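-- pv_equiv track=rewrite | github.com/Adamv1776/hydrarecon | core/polymorphic_engine.py | _obfuscate_commands_ps
-- ===== SOURCE A (Python) =====
-- def _obfuscate_commands_ps(code: str) -> str:
--     """Obfuscate PowerShell commands"""
--     replacements = {
--         'Invoke-Expression': "& ([scriptblock]::Create(((-join('I','n','v','o','k','e','-','E','x','p','r','e','s','s','i','o','n'))))",
--         'IEX': '&(gcm *ke-E*)',
--         'New-Object': '&(gcm *w-O*)',
--         'Invoke-WebRequest': '&(gcm *ke-WebR*)',
--         'Start-Process': '&(gcm *rt-Pr*)',
--     }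
--
--     for cmd, replacement in replacements.items():
--         code = code.replace(cmd, replacement)
--
--     return code
-- ===== SOURCE B (Python) =====
-- import re
--
-- _PS_REPLACEMENTS = {
--     'Invoke-Expression': "& ([scriptblock]::Create(((-join('I','n','v','o','k','e','-','E','x','p','r','e','s','s','i','o','n'))))",
--     'IEX': '&(gcm *ke-E*)',
--     'New-Object': '&(gcm *w-O*)',
--     'Invoke-WebRequest': '&(gcm *ke-WebR*)',
--     'Start-Process': '&(gcm *rt-Pr*)',
-- }
--
-- _PS_PATTERN = re.compile('|'.join(re.escape(cmd) for cmd in _PS_REPLACEMENTS))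
--
--
-- def _obfuscate_commands_ps(code: str) -> str:
--     """Obfuscate PowerShell commands in one combined substitution pass."""
--     return _PS_PATTERN.sub(lambda m: _PS_REPLACEMENTS[m.group(0)], code)
-- ===== Notes on version B (the rewrite author's own statement) =====
-- stated objective: idiomatic
-- what changed: Replaces A's five sequential full-string str.replace passes with one compiled-regex alternation and a single re.sub pass that maps each matched command through the replacements dict.
import Mathlib
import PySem

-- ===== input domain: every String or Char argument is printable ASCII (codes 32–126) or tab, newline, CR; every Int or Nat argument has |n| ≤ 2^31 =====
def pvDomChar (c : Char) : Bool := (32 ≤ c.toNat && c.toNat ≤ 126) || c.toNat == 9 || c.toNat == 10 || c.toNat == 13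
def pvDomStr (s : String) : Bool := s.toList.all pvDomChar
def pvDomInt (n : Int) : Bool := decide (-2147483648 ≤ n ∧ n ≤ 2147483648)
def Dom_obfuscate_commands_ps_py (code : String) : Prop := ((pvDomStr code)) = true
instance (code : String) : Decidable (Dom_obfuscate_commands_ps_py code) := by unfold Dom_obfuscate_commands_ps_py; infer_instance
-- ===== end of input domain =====

-- B replaces A's five sequential str.replace passes by ONE left-to-right scan (a single
-- combined-substitution pass, re.sub over an alternation of the five command strings);
-- objective: idiomatic/alternative — one pass over the code instead of five.

-- ===== PORT A =====
-- the replacements dict of A, as an association list in insertion order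
def psReplacements : List (String × String) :=
  [("Invoke-Expression", "& ([scriptblock]::Create(((-join('I','n','v','o','k','e','-','E','x','p','r','e','s','s','i','o','n'))))"),
   ("IEX", "&(gcm *ke-E*)"),
   ("New-Object", "&(gcm *w-O*)"),
   ("Invoke-WebRequest", "&(gcm *ke-WebR*)"),
   ("Start-Process", "&(gcm *rt-Pr*)")]

-- A: for cmd, replacement in replacements.items(): code = code.replace(cmd, replacement)
def obfuscate_commands_ps_py (code : String) : String :=
  psReplacements.foldl (fun code p => PySem.Str.replace code p.1 p.2) code

-- ===== PORT B =====
-- Source B compiles one alternation pattern over the dict's keys (in dict order) and does a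
-- single re.sub pass.  The pattern's keys/replacements, as code-point lists:
def psPat : List (List Char × List Char) :=
  psReplacements.map (fun p => (p.1.toList, p.2.toList))

-- the single substitution pass: at each position try the alternatives in pattern order
-- (re.sub's leftmost-match, first-alternative rule for a literal alternation)
def scanRepl (ks : List (List Char × List Char)) (l : List Char) : List Char :=
  match l with
  | [] => []
  | c :: t =>
    match ks.find? (fun p => p.1.isPrefixOf (c :: t)) with
    | some p => p.2 ++ scanRepl ks (t.drop (p.1.length - 1))
    | none => c :: scanRepl ks t
termination_by l.length
decreasing_by
  all_goals simp only [List.length_cons, List.length_drop]; omega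

def obfuscate_commands_ps_py_alt (code : String) : String :=
  String.ofList (scanRepl psPat code.toList)

-- ===== PRECONDITION & SPEC =====
def Spec_obfuscate_commands_ps_py (code : String) (out : String) : Prop := out = obfuscate_commands_ps_py_alt code
instance (code : String) (out : String) : Decidable (Spec_obfuscate_commands_ps_py code out) := by unfold Spec_obfuscate_commands_ps_py; infer_instance

-- ===== CLAIM (what is proved, stated in full; the proofs are below) =====
def Claim_equal_obfuscate_commands_ps_py : Prop := ∀ (code : String), Dom_obfuscate_commands_ps_py code → Spec_obfuscate_commands_ps_py code (obfuscate_commands_ps_py code)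

-- ===== LEMMAS AND PROOFS =====

-- clean recursion equivalent to PySem.Chars.replace (Python str.replace) for nonempty old
def repl (old new : List Char) (l : List Char) : List Char :=
  match l with
  | [] => []
  | c :: t =>
    if old.isPrefixOf (c :: t) then new ++ repl old new (t.drop (old.length - 1))
    else c :: repl old new t
termination_by l.length
decreasing_by
  all_goals simp only [List.length_cons, List.length_drop]; omega

theorem go_eq (old new : List Char) (h : old ≠ []) :
    ∀ fuel l acc, l.length ≤ fuel →
      PySem.Chars.replace.go old new fuel l acc = acc.reverse ++ repl old new l := by
  have ho : 1 ≤ old.length := List.length_pos_iff.mpr h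
  intro fuel
  induction fuel with
  | zero =>
    intro l acc hl
    have : l = [] := List.eq_nil_of_length_eq_zero (by omega)
    subst this
    simp [PySem.Chars.replace.go, repl]
  | succ n ih =>
    intro l acc hl
    cases l with
    | nil => simp [PySem.Chars.replace.go, repl]
    | cons c t =>
      rw [PySem.Chars.replace.go]
      simp only [List.length_cons] at hl
      by_cases hp : old.isPrefixOf (c :: t)
      · simp only [hp, if_true]
        rw [ih (List.drop old.length (c :: t)) (new.reverse ++ acc)
            (by simp only [List.length_drop, List.length_cons]; omega)]
        rw [repl]
        simp only [hp, if_true]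
        have hdrop : List.drop old.length (c :: t) = t.drop (old.length - 1) := by
          cases old with
          | nil => exact absurd rfl h
          | cons o os => simp
        rw [hdrop, List.reverse_append, List.reverse_reverse, List.append_assoc]
      · simp only [hp]
        rw [ih t (c :: acc) (by omega), repl]
        simp [hp]

theorem replace_eq_repl (old new l : List Char) (h : old ≠ []) :
    PySem.Chars.replace l old new = repl old new l := by
  rw [PySem.Chars.replace]
  simp [List.isEmpty_iff, h]
  exact go_eq old new h l.length l [] le_rfl

theorem scan_nil_input (ks : List (List Char × List Char)) : scanRepl ks [] = [] := by
  rw [scanRepl]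

theorem scan_cons_some {ks : List (List Char × List Char)} {c : Char} {t : List Char} {p}
    (hf : ks.find? (fun p => p.1.isPrefixOf (c :: t)) = some p) :
    scanRepl ks (c :: t) = p.2 ++ scanRepl ks (t.drop (p.1.length - 1)) := by
  rw [scanRepl, hf]

theorem scan_cons_none {ks : List (List Char × List Char)} {c : Char} {t : List Char}
    (hf : ks.find? (fun p => p.1.isPrefixOf (c :: t)) = none) :
    scanRepl ks (c :: t) = c :: scanRepl ks t := by
  rw [scanRepl, hf]

-- u prefix of an append: it ends inside v or covers v
theorem prefix_append_cases {u v w : List Char} (h : u <+: v ++ w) : u <+: v ∨ v <+: u := by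
  induction u generalizing v with
  | nil => exact Or.inl (List.nil_prefix)
  | cons a u' ih =>
    cases v with
    | nil => exact Or.inr List.nil_prefix
    | cons b v' =>
      simp only [List.cons_append, List.cons_prefix_cons] at h ⊢
      obtain ⟨rfl, h2⟩ := h
      rcases ih h2 with h3 | h3
      · exact Or.inl ⟨rfl, h3⟩
      · exact Or.inr ⟨rfl, h3⟩

theorem prefix_append_iff_of_le {u v w : List Char} (hle : u.length ≤ v.length) :
    u <+: v ++ w ↔ u <+: v := by
  constructor
  · intro h
    rcases prefix_append_cases h with h1 | h1
    · exact h1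
    · have hvu : v = u := List.IsPrefix.eq_of_length_le h1 hle
      subst hvu
      exact List.prefix_refl _
  · exact fun h => h.trans (List.prefix_append v w)

-- repl copies a region where old never matches
theorem repl_skip (old new : List Char) :
    ∀ n l, (∀ m, m < n → ¬ old <+: l.drop m) →
      repl old new l = l.take n ++ repl old new (l.drop n) := by
  intro n
  induction n with
  | zero => intro l _; simp
  | succ n ih =>
    intro l hno
    cases l with
    | nil => simp [repl]
    | cons c t =>
      have h0 : ¬ old.isPrefixOf (c :: t) := by
        intro h
        exact hno 0 (Nat.succ_pos n) (List.isPrefixOf_iff_prefix.mp h)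
      rw [repl, if_neg h0]
      simp only [List.take_succ_cons, List.drop_succ_cons, List.cons_append]
      exact congrArg (List.cons c) (ih t (fun m hm => hno (m + 1) (by omega)))

-- a prefix of repl's output that avoids new's first character comes from the input
theorem prefix_repl (old new : List Char) (hd : Char) (hh : new.head? = some hd) :
    ∀ n l k', l.length ≤ n → hd ∉ k' →
      k' <+: repl old new l → k' <+: l := by
  intro n
  induction n with
  | zero =>
    intro l k' hl _ hpre
    have : l = [] := List.eq_nil_of_length_eq_zero (by omega)
    subst this
    rw [repl] at hpre
    simpa using hpre
  | succ n ih =>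
    intro l k' hl hk hpre
    cases l with
    | nil =>
      rw [repl] at hpre
      simpa using hpre
    | cons c t =>
      simp only [List.length_cons] at hl
      rw [repl] at hpre
      by_cases hp : old.isPrefixOf (c :: t)
      · simp only [hp, if_true] at hpre
        cases k' with
        | nil => exact List.nil_prefix
        | cons a k'' =>
          exfalso
          cases new with
          | nil => simp at hh
          | cons b nt =>
            simp only [List.head?_cons, Option.some.injEq] at hh
            simp only [List.cons_append, List.cons_prefix_cons] at hpre
            have ha : a = hd := hpre.1.trans hh
            exact hk (by rw [← ha]; exact List.mem_cons_self)
      · rw [if_neg hp] at hpre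
        cases k' with
        | nil => exact List.nil_prefix
        | cons a k'' =>
          simp only [List.cons_prefix_cons] at hpre ⊢
          refine ⟨hpre.1, ih t k'' (by omega) (fun hm => hk (List.mem_cons_of_mem a hm)) hpre.2⟩

-- the scan copies a region where no alternative can match
theorem scan_skip (ks : List (List Char × List Char)) :
    ∀ (u X : List Char), (∀ q, q < u.length → ∀ p ∈ ks, ¬ p.1 <+: (u.drop q ++ X)) →
      scanRepl ks (u ++ X) = u ++ scanRepl ks X := by
  intro u
  induction u with
  | nil => intro X _; simp
  | cons c u' ih =>
    intro X hno
    have hf : ks.find? (fun p => p.1.isPrefixOf (c :: (u' ++ X))) = none := by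
      rw [List.find?_eq_none]
      intro p hp hpre
      exact hno 0 (by simp) p hp (by simpa using List.isPrefixOf_iff_prefix.mp hpre)
    rw [List.cons_append, scan_cons_none hf]
    have hno' : ∀ q, q < u'.length → ∀ p ∈ ks, ¬ p.1 <+: (u'.drop q ++ X) := by
      intro q hq p hp h
      exact hno (q + 1) (by simp only [List.length_cons]; omega) p hp (by simpa using h)
    rw [ih X hno', List.cons_append]

theorem find?_congr {α : Type} {f g : α → Bool} :
    ∀ (l : List α), (∀ x ∈ l, f x = g x) → l.find? f = l.find? g := by
  intro l
  induction l with
  | nil => intro _; rfl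
  | cons a l ih =>
    intro h
    simp only [List.find?_cons, h a List.mem_cons_self]
    cases g a <;> simp [ih (fun x hx => h x (List.mem_cons_of_mem a hx))]

-- MAIN STEP: one str.replace pass absorbed into the scan, becoming its first alternative
theorem step (old new : List Char) (ks : List (List Char × List Char))
    (hold : old ≠ [])
    (hne : ∀ p ∈ ks, p.1 ≠ [])
    (hd : Char) (hh : new.head? = some hd)
    (hhd : ∀ p ∈ ks, hd ∉ p.1)
    (hAmp : ∀ p ∈ ks, ∀ q, q < new.length → ¬ p.1 <+: new.drop q ∧ ¬ new.drop q <+: p.1)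
    (hOv : ∀ p ∈ ks, ∀ q, q < p.1.length → 0 < q → ¬ old <+: p.1.drop q ∧ ¬ p.1.drop q <+: old)
    (hNP : ks.Pairwise fun p p' => ¬ p.1 <+: p'.1 ∧ ¬ p'.1 <+: p.1) :
    ∀ l, scanRepl ks (repl old new l) = scanRepl ((old, new) :: ks) l := by
  have hOl : 1 ≤ old.length := List.length_pos_iff.mpr hold
  suffices H : ∀ n l, l.length ≤ n → scanRepl ks (repl old new l) = scanRepl ((old, new) :: ks) l by
    intro l; exact H l.length l le_rfl
  intro n
  induction n with
  | zero =>
    intro l hl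
    have : l = [] := List.eq_nil_of_length_eq_zero (by omega)
    subst this
    rw [repl, scan_nil_input, scan_nil_input]
  | succ n ih =>
    intro l hl
    cases l with
    | nil => rw [repl, scan_nil_input, scan_nil_input]
    | cons c t =>
      simp only [List.length_cons] at hl
      by_cases hp : old.isPrefixOf (c :: t)
      · -- the new alternative matches here
        rw [repl]
        simp only [hp, if_true]
        rw [scan_skip ks new _ ?noks]
        case noks =>
          intro q hq p hpmem hpre
          rcases prefix_append_cases hpre with h1 | h1
          · exact (hAmp p hpmem q hq).1 h1
          · exact (hAmp p hpmem q hq).2 h1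
        rw [ih _ (by simp only [List.length_drop]; omega)]
        have hfc : ((old, new) :: ks).find? (fun p => p.1.isPrefixOf (c :: t)) = some (old, new) := by
          simp [List.find?_cons, hp]
        rw [scan_cons_some hfc]
      · -- old does not match at this position
        have hpn : ¬ old <+: c :: t := fun h => hp (List.isPrefixOf_iff_prefix.mpr h)
        cases hf : ks.find? (fun p => p.1.isPrefixOf (c :: t)) with
        | some p =>
          -- some other alternative matches first
          obtain ⟨p1, p2⟩ := p
          have hmem : (p1, p2) ∈ ks := List.mem_of_find?_eq_some hf
          have h1 := List.find?_some hf
          simp only [List.isPrefixOf_iff_prefix] at h1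
          obtain ⟨l', hl'⟩ := h1
          have hpk : p1 <+: c :: t := ⟨l', hl'⟩
          have hne1 : p1 ≠ [] := hne _ hmem
          have hk1 : 1 ≤ p1.length := List.length_pos_iff.mpr hne1
          -- old matches nowhere inside p1's span
          have hno : ∀ m, m < p1.length → ¬ old <+: (c :: t).drop m := by
            intro m hm hpre
            rcases Nat.eq_zero_or_pos m with rfl | hm0
            · exact hpn (by simpa using hpre)
            · rw [← hl', List.drop_append, Nat.sub_eq_zero_of_le (le_of_lt hm),
                List.drop_zero] at hpre
              rcases prefix_append_cases hpre with h2 | h2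
              · exact (hOv _ hmem m hm hm0).1 h2
              · exact (hOv _ hmem m hm hm0).2 h2
          have hrepl : repl old new (c :: t) = p1 ++ repl old new ((c :: t).drop p1.length) := by
            rw [repl_skip old new p1.length (c :: t) hno,
              (List.prefix_iff_eq_take.mp hpk).symm]
          -- the scan finds the same alternative on the partially rewritten string
          have hcongr : ks.find? (fun x =>
              x.1.isPrefixOf (p1 ++ repl old new ((c :: t).drop p1.length))) = some (p1, p2) := by
            rw [find?_congr ks (g := fun x => x.1.isPrefixOf (c :: t)) ?heq]
            · exact hf
            case heq =>
              intro x hx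
              apply Bool.coe_iff_coe.mp
              simp only [List.isPrefixOf_iff_prefix]
              by_cases hxl : x.1.length ≤ p1.length
              · rw [prefix_append_iff_of_le hxl, ← hl', prefix_append_iff_of_le hxl]
              · have hxl' : p1.length < x.1.length := by omega
                have hnk : ¬ p1 <+: x.1 := by
                  rcases eq_or_ne x (p1, p2) with rfl | hxp
                  · exact absurd hxl' (lt_irrefl _)
                  · exact (List.Pairwise.forall
                      (by intro a b hab; exact ⟨hab.2, hab.1⟩) hNP hx hmem hxp).2
                constructor
                · intro h
                  rcases prefix_append_cases h with h2 | h2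
                  · exact absurd (List.IsPrefix.length_le h2) (by omega)
                  · exact absurd h2 hnk
                · intro h
                  rw [← hl'] at h
                  rcases prefix_append_cases h with h2 | h2
                  · exact absurd (List.IsPrefix.length_le h2) (by omega)
                  · exact absurd h2 hnk
          have hdt : (c :: t).drop p1.length = t.drop (p1.length - 1) := by
            cases p1 with
            | nil => exact absurd rfl hne1
            | cons k0 ktl => simp
          rw [hrepl]
          have hscan : scanRepl ks (p1 ++ repl old new ((c :: t).drop p1.length))
              = p2 ++ scanRepl ks (repl old new ((c :: t).drop p1.length)) := by
            cases p1 with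
            | nil => exact absurd rfl hne1
            | cons k0 ktl =>
              simp only [List.cons_append] at hcongr ⊢
              rw [scan_cons_some hcongr]
              congr 1
              simp [List.drop_left]
          rw [hscan, ih _ (by rw [hdt]; simp only [List.length_drop]; omega)]
          have hfc : ((old, new) :: ks).find? (fun x => x.1.isPrefixOf (c :: t)) = some (p1, p2) := by
            simp [List.find?_cons, hp, hf]
          rw [scan_cons_some hfc, hdt]
        | none =>
          -- no alternative matches: copy one character
          rw [repl, if_neg hp]
          have hfn : ks.find? (fun x => x.1.isPrefixOf (c :: repl old new t)) = none := by
            rw [List.find?_eq_none]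
            intro x hx hpre
            rw [List.isPrefixOf_iff_prefix] at hpre
            cases hx1 : x.1 with
            | nil => exact hne x hx hx1
            | cons a k'' =>
              rw [hx1, List.cons_prefix_cons] at hpre
              have hk'' : k'' <+: t :=
                prefix_repl old new hd hh t.length t k'' le_rfl
                  (fun hm => hhd x hx (hx1 ▸ List.mem_cons_of_mem a hm)) hpre.2
              have : x.1 <+: c :: t := by
                rw [hx1, hpre.1]
                exact List.cons_prefix_cons.mpr ⟨rfl, hk''⟩
              exact (List.find?_eq_none.mp hf x hx) (List.isPrefixOf_iff_prefix.mpr this)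
          rw [scan_cons_none hfn, ih t (by omega)]
          have hfc : ((old, new) :: ks).find? (fun x => x.1.isPrefixOf (c :: t)) = none := by
            simp [List.find?_cons, hp, hf]
          rw [scan_cons_none hfc]

-- the empty scan is the identity
theorem scan_nil (l : List Char) : scanRepl [] l = l := by
  induction l with
  | nil => rw [scanRepl]
  | cons c t ih => rw [scan_cons_none (by simp), ih]

set_option maxRecDepth 4000 in
theorem scan_chain (cs : List Char) :
    scanRepl [("Invoke-Expression".toList, "& ([scriptblock]::Create(((-join('I','n','v','o','k','e','-','E','x','p','r','e','s','s','i','o','n'))))".toList), ("IEX".toList, "&(gcm *ke-E*)".toList), ("New-Object".toList, "&(gcm *w-O*)".toList), ("Invoke-WebRequest".toList, "&(gcm *ke-WebR*)".toList), ("Start-Process".toList, "&(gcm *rt-Pr*)".toList)] cs = repl "Start-Process".toList "&(gcm *rt-Pr*)".toList (repl "Invoke-WebRequest".toList "&(gcm *ke-WebR*)".toList (repl "New-Object".toList "&(gcm *w-O*)".toList (repl "IEX".toList "&(gcm *ke-E*)".toList (repl "Invoke-Expression".toList "& ([scriptblock]::Create(((-join('I','n','v','o','k','e','-','E','x','p','r','e','s','s','i','o','n'))))".toList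 (cs))))) := by
  calc scanRepl [("Invoke-Expression".toList, "& ([scriptblock]::Create(((-join('I','n','v','o','k','e','-','E','x','p','r','e','s','s','i','o','n'))))".toList), ("IEX".toList, "&(gcm *ke-E*)".toList), ("New-Object".toList, "&(gcm *w-O*)".toList), ("Invoke-WebRequest".toList, "&(gcm *ke-WebR*)".toList), ("Start-Process".toList, "&(gcm *rt-Pr*)".toList)] cs
      _ = scanRepl [("IEX".toList, "&(gcm *ke-E*)".toList), ("New-Object".toList, "&(gcm *w-O*)".toList), ("Invoke-WebRequest".toList, "&(gcm *ke-WebR*)".toList), ("Start-Process".toList, "&(gcm *rt-Pr*)".toList)] (repl "Invoke-Expression".toList "& ([scriptblock]::Create(((-join('I','n','v','o','k','e','-','E','x','p','r','e','s','s','i','o','n'))))".toList (cs)) := (step "Invoke-Expression".toList "& ([scriptblock]::Create(((-join('I','n','v','o','k','e','-','E','x','p','r','e','s','s','i','o','n'))))".toList [("IEX".toList, "&(gcm *ke-E*)".toList), ("New-Object".toList, "&(gcm *w-O*)".toList), ("Invoke-WebRequest".toList, "&(gcm *ke-WebR*)".toList), ("Start-Process".toList, "&(gcm *rt-Pr*)".toList)]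 (by decide) (by decide) '&' (by decide) (by decide) (by decide) (by decide) (by decide) (cs)).symm
      _ = scanRepl [("New-Object".toList, "&(gcm *w-O*)".toList), ("Invoke-WebRequest".toList, "&(gcm *ke-WebR*)".toList), ("Start-Process".toList, "&(gcm *rt-Pr*)".toList)] (repl "IEX".toList "&(gcm *ke-E*)".toList (repl "Invoke-Expression".toList "& ([scriptblock]::Create(((-join('I','n','v','o','k','e','-','E','x','p','r','e','s','s','i','o','n'))))".toList (cs))) := (step "IEX".toList "&(gcm *ke-E*)".toList [("New-Object".toList, "&(gcm *w-O*)".toList), ("Invoke-WebRequest".toList, "&(gcm *ke-WebR*)".toList), ("Start-Process".toList, "&(gcm *rt-Pr*)".toList)] (by decide) (by decide) '&' (by decide) (by decide) (by decide) (by decide) (by decide) (repl "Invoke-Expression".toList "& ([scriptblock]::Create(((-join('I','n','v','o','k','e','-','E','x','p','r','e','s','s','i','o','n'))))".toList (cs))).symm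
      _ = scanRepl [("Invoke-WebRequest".toList, "&(gcm *ke-WebR*)".toList), ("Start-Process".toList, "&(gcm *rt-Pr*)".toList)] (repl "New-Object".toList "&(gcm *w-O*)".toList (repl "IEX".toList "&(gcm *ke-E*)".toList (repl "Invoke-Expression".toList "& ([scriptblock]::Create(((-join('I','n','v','o','k','e','-','E','x','p','r','e','s','s','i','o','n'))))".toList (cs)))) := (step "New-Object".toList "&(gcm *w-O*)".toList [("Invoke-WebRequest".toList, "&(gcm *ke-WebR*)".toList), ("Start-Process".toList, "&(gcm *rt-Pr*)".toList)] (by decide) (by decide) '&' (by decide) (by decide) (by decide) (by decide) (by decide) (repl "IEX".toList "&(gcm *ke-E*)".toList (repl "Invoke-Expression".toList "& ([scriptblock]::Create(((-join('I','n','v','o','k','e','-','E','x','p','r','e','s','s','i','o','n'))))".toList (cs)))).symm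
      _ = scanRepl [("Start-Process".toList, "&(gcm *rt-Pr*)".toList)] (repl "Invoke-WebRequest".toList "&(gcm *ke-WebR*)".toList (repl "New-Object".toList "&(gcm *w-O*)".toList (repl "IEX".toList "&(gcm *ke-E*)".toList (repl "Invoke-Expression".toList "& ([scriptblock]::Create(((-join('I','n','v','o','k','e','-','E','x','p','r','e','s','s','i','o','n'))))".toList (cs))))) := (step "Invoke-WebRequest".toList "&(gcm *ke-WebR*)".toList [("Start-Process".toList, "&(gcm *rt-Pr*)".toList)] (by decide) (by decide) '&' (by decide) (by decide) (by decide) (by decide) (by decide) (repl "New-Object".toList "&(gcm *w-O*)".toList (repl "IEX".toList "&(gcm *ke-E*)".toList (repl "Invoke-Expression".toList "& ([scriptblock]::Create(((-join('I','n','v','o','k','e','-','E','x','p','r','e','s','s','i','o','n'))))".toList (cs))))).symm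
      _ = scanRepl [] (repl "Start-Process".toList "&(gcm *rt-Pr*)".toList (repl "Invoke-WebRequest".toList "&(gcm *ke-WebR*)".toList (repl "New-Object".toList "&(gcm *w-O*)".toList (repl "IEX".toList "&(gcm *ke-E*)".toList (repl "Invoke-Expression".toList "& ([scriptblock]::Create(((-join('I','n','v','o','k','e','-','E','x','p','r','e','s','s','i','o','n'))))".toList (cs)))))) := (step "Start-Process".toList "&(gcm *rt-Pr*)".toList [] (by decide) (by decide) '&' (by decide) (by decide) (by decide) (by decide) (by decide) (repl "Invoke-WebRequest".toList "&(gcm *ke-WebR*)".toList (repl "New-Object".toList "&(gcm *w-O*)".toList (repl "IEX".toList "&(gcm *ke-E*)".toList (repl "Invoke-Expression".toList "& ([scriptblock]::Create(((-join('I','n','v','o','k','e','-','E','x','p','r','e','s','s','i','o','n'))))".toList (cs)))))).symm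
      _ = repl "Start-Process".toList "&(gcm *rt-Pr*)".toList (repl "Invoke-WebRequest".toList "&(gcm *ke-WebR*)".toList (repl "New-Object".toList "&(gcm *w-O*)".toList (repl "IEX".toList "&(gcm *ke-E*)".toList (repl "Invoke-Expression".toList "& ([scriptblock]::Create(((-join('I','n','v','o','k','e','-','E','x','p','r','e','s','s','i','o','n'))))".toList (cs))))) := scan_nil _

-- ===== VERDICT (by name: the statement is the Claim_ definition above) =====
theorem obfuscate_commands_ps_py_spec : Claim_equal_obfuscate_commands_ps_py := by
  intro code _
  unfold Spec_obfuscate_commands_ps_py obfuscate_commands_ps_py obfuscate_commands_ps_py_alt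
  simp only [psReplacements, psPat, List.map_cons, List.map_nil, List.foldl_cons, List.foldl_nil,
    PySem.Str.replace, String.toList_ofList]
  rw [scan_chain code.toList]
  rw [replace_eq_repl _ _ _ (by decide : ("Invoke-Expression".toList) ≠ []),
    replace_eq_repl _ _ _ (by decide : ("IEX".toList) ≠ []),
    replace_eq_repl _ _ _ (by decide : ("New-Object".toList) ≠ []),
    replace_eq_repl _ _ _ (by decide : ("Invoke-WebRequest".toList) ≠ []),
    replace_eq_repl _ _ _ (by decide : ("Start-Process".toList) ≠ [])]
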